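-- pv_equiv track=rewrite | github.com/lizhe2016/RFBFN | utils.py | get_batch
-- ===== SOURCE A (Python) =====
-- def get_batch(samples, batch_size, is_single_batch):
--     list_samples_batches = []
--     if not is_single_batch:
--         for i in range(0, len(samples), batch_size):
--             list_samples_batches.append(samples[i: i + batch_size])
--     else:
--         to_single_batch = []
--         for i in range(0, len(samples)):
--             if len(samples[i]['id']) > 350:
--                 to_single_batch.append(i)
--
--         for i in to_single_batch:
--             list_samples_batches.append([samples[i]])
--         samples = [sample for i, sample in enumerate(samples) if i not in to_single_batch]
--
--         for i in range(0, len(samples), batch_size):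
--             list_samples_batches.append(samples[i: i + batch_size])
--     return list_samples_batches
-- ===== SOURCE B (Python) =====
-- def get_batch(samples, batch_size, is_single_batch):
--     def chunks(xs):
--         batches = []
--         while xs:
--             batches.append(xs[:batch_size])
--             xs = xs[batch_size:]
--         return batches
--
--     if not is_single_batch:
--         return chunks(samples)
--     singles = []
--     rest = []
--     for sample in samples:
--         if len(sample['id']) > 350:
--             singles.append(sample)
--         else:
--             rest.append(sample)
--     return [[s] for s in singles] + chunks(rest)
-- ===== Notes on version B (the rewrite author's own statement) =====
-- stated objective: simpler
-- what changed: One partition pass collects long samples and the rest directly (eliminating A's index list, its second index loop and the 'i not in to_single_batch' membership scan), and chunking becomes a while-loop on take/drop slices instead of an index range.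
-- outside the precondition, e.g. on get_batch([{'id': 'x'}], -1, False): A returns [], B does not finish within the time limit
import Mathlib
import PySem

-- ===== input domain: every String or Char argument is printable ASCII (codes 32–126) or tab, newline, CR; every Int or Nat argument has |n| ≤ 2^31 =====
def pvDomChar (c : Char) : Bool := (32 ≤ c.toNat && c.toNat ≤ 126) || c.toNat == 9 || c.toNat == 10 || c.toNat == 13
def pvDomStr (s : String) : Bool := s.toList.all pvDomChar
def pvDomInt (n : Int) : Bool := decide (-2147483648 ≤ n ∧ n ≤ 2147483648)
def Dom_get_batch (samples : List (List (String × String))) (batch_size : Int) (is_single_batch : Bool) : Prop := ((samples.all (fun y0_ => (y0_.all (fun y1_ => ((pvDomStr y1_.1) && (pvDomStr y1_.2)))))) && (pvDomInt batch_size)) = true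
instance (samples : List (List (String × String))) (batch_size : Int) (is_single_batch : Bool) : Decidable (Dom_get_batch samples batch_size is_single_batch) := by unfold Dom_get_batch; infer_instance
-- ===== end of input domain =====

-- B replaces A's three passes (index collection, index loop, membership-filter comprehension) by one
-- partition pass, and chunks by take/drop slicing; simpler, return value only (neither mutates its input).

-- ===== PORT A =====
-- len(sample['id']); the getD "" default is never used under Pre_ (the key is present there)
def pyIdLen (s : List (String × String)) : Int :=
  PySem.Str.len (((PySem.Dict.mk s).get? "id").getD "")

def get_batch (samples : List (List (String × String))) (batch_size : Int) (is_single_batch : Bool) : List (List (List (String × String))) :=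
  if !is_single_batch then
    (PySem.List.pyRange 0 (samples.length : Int) batch_size).foldl
      (fun acc i => acc ++ [PySem.List.slice samples (some i) (some (i + batch_size))]) []
  else
    let to_single_batch : List Int :=
      (PySem.List.pyRange 0 (samples.length : Int) 1).foldl
        (fun acc i => if pyIdLen (PySem.List.pyGetD samples i []) > 350 then acc ++ [i] else acc) []
    let lsb : List (List (List (String × String))) :=
      to_single_batch.foldl (fun acc i => acc ++ [[PySem.List.pyGetD samples i []]]) []
    let samples2 : List (List (String × String)) :=
      (PySem.List.enumerate samples 0).foldl
        (fun acc p => if !(to_single_batch.contains p.1) then acc ++ [p.2] else acc) []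
    (PySem.List.pyRange 0 (samples2.length : Int) batch_size).foldl
      (fun acc i => acc ++ [PySem.List.slice samples2 (some i) (some (i + batch_size))]) lsb

-- ===== PORT B =====
-- 'while xs: batches.append(xs[:batch_size]); xs = xs[batch_size:]' — the fuel only makes the loop
-- total; it starts at the list's length and never runs out when 1 ≤ batch_size (Pre_)
def chunksB {α : Type} (bs : Int) : Nat → List α → List (List α)
  | _, [] => []
  | 0, _ :: _ => []
  | fuel + 1, x :: xs =>
      PySem.List.slice (x :: xs) none (some bs) ::
        chunksB bs fuel (PySem.List.slice (x :: xs) (some bs) none)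

def get_batch_alt (samples : List (List (String × String))) (batch_size : Int) (is_single_batch : Bool) : List (List (List (String × String))) :=
  if !is_single_batch then
    chunksB batch_size samples.length samples
  else
    let pr :=
      samples.foldl
        (fun (p : List (List (String × String)) × List (List (String × String))) s =>
          if pyIdLen s > 350 then (p.1 ++ [s], p.2) else (p.1, p.2 ++ [s]))
        ([], [])
    pr.1.map (fun s => [s]) ++ chunksB batch_size pr.2.length pr.2

-- ===== PRECONDITION & SPEC =====
-- Pre_ restricts to the natural domain: a positive batch size (A raises ValueError at 0, and for a
-- negative size A's empty range yields a degenerate un-chunked result while B's while-loop would not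
-- terminate), and in the single-batch branch every sample carrying the 'id' key (A raises KeyError otherwise).
def Pre_get_batch (samples : List (List (String × String))) (batch_size : Int) (is_single_batch : Bool) : Prop :=
  1 ≤ batch_size ∧
    (is_single_batch = true → ∀ s ∈ samples, ((PySem.Dict.mk s).get? "id").isSome = true)
instance (samples : List (List (String × String))) (batch_size : Int) (is_single_batch : Bool) : Decidable (Pre_get_batch samples batch_size is_single_batch) := by unfold Pre_get_batch; infer_instance

def pvWitness_get_batch : (List (List (String × String))) × Int × Bool :=
  ([[("id", "a")], [("id", "b"), ("x", "c")], [("id", "d")]], 2, true)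

def Spec_get_batch (samples : List (List (String × String))) (batch_size : Int) (is_single_batch : Bool) (out : List (List (List (String × String)))) : Prop := out = get_batch_alt samples batch_size is_single_batch
instance (samples : List (List (String × String))) (batch_size : Int) (is_single_batch : Bool) (out : List (List (List (String × String)))) : Decidable (Spec_get_batch samples batch_size is_single_batch out) := by unfold Spec_get_batch; infer_instance

-- ===== CLAIM (what is proved, stated in full; the proofs are below) =====
def Claim_equal_get_batch : Prop := ∀ (samples : List (List (String × String))) (batch_size : Int) (is_single_batch : Bool), Dom_get_batch samples batch_size is_single_batch → Pre_get_batch samples batch_size is_single_batch → Spec_get_batch samples batch_size is_single_batch (get_batch samples batch_size is_single_batch)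

-- ===== LEMMAS AND PROOFS =====

-- B's partition loop leaves exactly the two filters of the input, in order
lemma foldl_partition {α : Type} (P : α → Prop) [DecidablePred P] :
    ∀ (xs : List α) (a b : List α),
      xs.foldl (fun p s => if P s then (p.1 ++ [s], p.2) else (p.1, p.2 ++ [s])) (a, b)
        = (a ++ xs.filter (fun s => decide (P s)), b ++ xs.filter (fun s => !decide (P s))) := by
  intro xs
  induction xs with
  | nil => simp
  | cons x t ih =>
      intro a b
      by_cases h : P x <;> simp [h, ih]

-- an index filter over range followed by indexing is a filter of the list itself
lemma filter_index_map {α β : Type} (q : α → Bool) (g : α → β) (d : α) :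
    ∀ (xs : List α),
      ((List.range xs.length).filter (fun k => q (xs.getD k d))).map (fun k => g (xs.getD k d))
        = (xs.filter q).map g := by
  intro xs
  induction xs with
  | nil => simp
  | cons x t ih =>
      rw [List.length_cons, List.range_succ_eq_map, List.filter_cons, List.filter_map]
      by_cases h : q x <;>
        simp [h, Function.comp_def, List.map_map, ← ih]

-- A's range/slice chunking loop is B's take/drop recursion (for any sufficient fuel)
lemma chunk_map_eq {α : Type} (B : Nat) (hB : 1 ≤ B) :
    ∀ (fuel : Nat) (xs : List α), xs.length ≤ fuel →
      (PySem.List.pyRange 0 (xs.length : Int) (B : Int)).map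
        (fun i => PySem.List.slice xs (some i) (some (i + (B : Int)))) = chunksB (B : Int) fuel xs := by
  have hBpos : (0 : Int) < (B : Int) := by exact_mod_cast hB
  intro fuel
  induction fuel with
  | zero =>
      intro xs hlen
      have : xs = [] := List.length_eq_zero_iff.mp (Nat.le_zero.mp hlen)
      subst this
      simp only [List.length_nil, Nat.cast_zero]
      rw [PySem.List.pyRange_of_pos 0 0 hBpos]
      simp [chunksB]
  | succ fuel ih =>
      intro xs hlen
      match xs with
      | [] =>
          simp only [List.length_nil, Nat.cast_zero]
          rw [PySem.List.pyRange_of_pos 0 0 hBpos]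
          simp [chunksB]
      | x :: t =>
          have hn1 : 1 ≤ (x :: t).length := by simp
          rw [PySem.List.pyRange_of_pos 0 ((x :: t).length : Int) hBpos]
          have hlt : (0 : Int) < ((x :: t).length : Int) := by exact_mod_cast hn1
          rw [if_pos hlt]
          have hnum : (((x :: t).length : Int) - 0 + (B : Int) - 1)
              = (((x :: t).length - 1 + B : Nat) : Int) := by push_cast [hn1]; omega
          have hdiv : ((((x :: t).length : Int) - 0 + (B : Int) - 1) / (B : Int)).toNat
              = ((x :: t).length - 1) / B + 1 := by
            rw [hnum, ← Int.natCast_ediv, Int.toNat_natCast]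
            exact Nat.add_div_right _ (by omega)
          rw [hdiv, List.range_succ_eq_map, List.map_cons, List.map_cons, List.map_map, List.map_map]
          show _ = PySem.List.slice (x :: t) none (some (B : Int)) ::
              chunksB (B : Int) fuel (PySem.List.slice (x :: t) (some (B : Int)) none)
          congr 1
          · -- the head chunk is xs[0:B]
            show PySem.List.slice (x :: t) (some ((0 : Int) + (B : Int) * ((0 : Nat) : Int)))
                (some ((0 : Int) + (B : Int) * ((0 : Nat) : Int) + (B : Int))) = _
            norm_num
          · -- the tail chunks are the chunks of xs[B:]
            have hdrop : PySem.List.slice (x :: t) (some (B : Int)) none = (x :: t).drop B :=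
              PySem.List.slice_from_natCast (x :: t) B
            rw [hdrop]
            rw [← ih ((x :: t).drop B) (by have h2 := hlen; simp at h2 ⊢; omega)]
            have hlen' : ((x :: t).drop B).length = (x :: t).length - B := by simp
            rw [hlen']
            by_cases hBn : (x :: t).length ≤ B
            · have h0 : (x :: t).length - B = 0 := by omega
              have h0' : ((x :: t).length - 1) / B = 0 := Nat.div_eq_of_lt (by omega)
              rw [h0, h0']
              simp only [Nat.cast_zero]
              rw [PySem.List.pyRange_of_pos 0 0 hBpos]
              simp
            · rw [not_le] at hBn
              rw [PySem.List.pyRange_of_pos 0 _ hBpos]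
              have hlt2 : (0 : Int) < (((x :: t).length - B : Nat) : Int) := by
                exact_mod_cast Nat.sub_pos_of_lt hBn
              rw [if_pos hlt2]
              have hnum2 : ((((x :: t).length - B : Nat) : Int) - 0 + (B : Int) - 1)
                  = ((((x :: t).length - 1) : Nat) : Int) := by
                push_cast [Nat.le_of_lt hBn, hn1]; omega
              have hdiv2 : (((((x :: t).length - B : Nat) : Int) - 0 + (B : Int) - 1) / (B : Int)).toNat
                  = ((x :: t).length - 1) / B := by
                rw [hnum2, ← Int.natCast_ediv, Int.toNat_natCast]
              rw [hdiv2, List.map_map]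
              apply List.map_congr_left
              intro k _
              simp only [Function.comp_apply]
              have e1 : (0 : Int) + (B : Int) * ((k + 1 : Nat) : Int) = ((B * (k + 1) : Nat) : Int) := by
                push_cast; ring
              have e2 : (0 : Int) + (B : Int) * ((k : Nat) : Int) = ((B * k : Nat) : Int) := by
                push_cast; ring
              rw [e1, e2, PySem.List.slice_natCast_add, PySem.List.slice_natCast_add,
                List.drop_drop]
              congr 2
              ring

-- A's chunking foldl, with any initial accumulator
lemma achunk_eq {α : Type} (bs : Int) (hbs : 1 ≤ bs) (xs : List α) (init : List (List α)) :
    (PySem.List.pyRange 0 (xs.length : Int) bs).foldl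
        (fun acc i => acc ++ [PySem.List.slice xs (some i) (some (i + bs))]) init
      = init ++ chunksB bs xs.length xs := by
  obtain ⟨B, rfl⟩ : ∃ B : Nat, bs = (B : Int) := ⟨bs.toNat, (Int.toNat_of_nonneg (by omega)).symm⟩
  rw [PySem.List.foldl_append_singleton_eq_map, chunk_map_eq B (by exact_mod_cast hbs) xs.length xs le_rfl]

-- ===== VERDICT (by name: the statement is the Claim_ definition above) =====
theorem get_batch_spec : Claim_equal_get_batch := by
  intro samples batch_size is_single_batch _hdom hpre
  obtain ⟨hbs, _⟩ := hpre
  unfold Spec_get_batch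
  cases is_single_batch with
  | false =>
      simp only [get_batch, get_batch_alt, Bool.not_false, if_pos]
      rw [achunk_eq batch_size hbs samples []]
      simp
  | true =>
      simp only [get_batch, get_batch_alt, Bool.not_true]
      rw [if_neg (by simp)]
      rw [if_neg (by simp)]
      -- A side: the index list becomes a filtered range
      rw [PySem.List.pyRange_one 0 (samples.length : Int)]
      simp only [sub_zero, Int.toNat_natCast, zero_add]
      rw [PySem.List.foldl_append_ite_eq_filter, List.filter_map]
      simp only [List.nil_append, Function.comp_def, PySem.List.pyGetD_natCast]
      -- the singleton-batch loop
      rw [PySem.List.foldl_append_singleton_eq_map (fun i => [PySem.List.pyGetD samples i []])]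
      rw [List.map_map]
      simp only [List.nil_append, Function.comp_def, PySem.List.pyGetD_natCast]
      rw [filter_index_map (fun s => decide (pyIdLen s > 350)) (fun s => [s]) []]
      -- the comprehension keeps exactly the samples that are not long
      rw [PySem.List.foldl_append_if _ (fun p : Int × List (String × String) => p.2)]
      rw [List.filter_congr (q := fun p : Int × List (String × String) => !(decide (pyIdLen p.2 > 350)))
          (by
            intro p hp
            rw [PySem.List.mem_enumerate_iff] at hp
            obtain ⟨k, hk, rfl⟩ := hp
            simp only [zero_add]
            congr 1
            have hgd : samples.getD k [] = samples[k] := List.getD_eq_getElem _ _ hk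
            by_cases hq : pyIdLen samples[k] > 350
            · simp only [hq, decide_true]
              have hmem : ((k : Nat) : Int) ∈ (List.filter (fun x => decide (pyIdLen (samples.getD x []) > 350)) (List.range samples.length)).map (fun k => ((k : Nat) : Int)) :=
                List.mem_map.mpr ⟨k, List.mem_filter.mpr ⟨List.mem_range.mpr hk, by rw [hgd]; exact decide_eq_true hq⟩, rfl⟩
              simpa [List.contains_iff_mem] using hmem
            · simp only [hq, decide_false]
              rw [Bool.eq_false_iff]
              intro hc
              rw [List.contains_iff_mem] at hc
              obtain ⟨j, hj, hjk⟩ := List.mem_map.mp hc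
              have : j = k := by exact_mod_cast hjk
              subst this
              have := (List.mem_filter.mp hj).2
              rw [hgd] at this
              exact hq (of_decide_eq_true this))]
      simp only [List.nil_append]
      have hcomp : (fun p : Int × List (String × String) => !(decide (pyIdLen p.2 > 350)))
          = ((fun s => !(decide (pyIdLen s > 350))) ∘ (fun p : Int × List (String × String) => p.2)) := rfl
      rw [hcomp, ← List.filter_map, PySem.List.map_snd_enumerate]
      -- final chunk loop
      rw [achunk_eq batch_size hbs _ _]
      -- B side
      rw [foldl_partition (fun s => pyIdLen s > 350) samples [] []]
      simp
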